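-- pv_equiv track=rewrite | github.com/tuannvhust/nlpxocr | scoring.py | replace_word_with_mask
-- ===== SOURCE A (Python) =====
-- def replace_word_with_mask(sentence,label):
--     words = sentence.split()
--     masked_strings = []
--     for i in range(len(words)):
--         masked_words = words.copy()
--         masked_words[i] = "<mask>"
--         masked_string = " ".join(masked_words)
--         masked_strings.append(masked_string)
--
--     output_dictionary = {label: masked_strings}
--     return output_dictionary
-- ===== SOURCE B (Python) =====
-- def replace_word_with_mask(sentence, label):
--     words = sentence.split()
--     # suffix strings, built back-to-front: suffixes[i] == " ".join(words[i+1:])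
--     suffixes = []
--     suf = ""
--     for w in reversed(words):
--         suffixes.append(suf)
--         suf = w if not suf else w + " " + suf
--     suffixes.reverse()
--     # forward pass: assemble each masked string from prefix / "<mask>" / suffix
--     masked_strings = []
--     pre = ""
--     for w, suf in zip(words, suffixes):
--         parts = [p for p in (pre, "<mask>", suf) if p]
--         masked_strings.append(" ".join(parts))
--         pre = w if not pre else pre + " " + w
--     return {label: masked_strings}
-- ===== Notes on version B (the rewrite author's own statement) =====
-- stated objective: alternative
-- what changed: Replaces the per-index whole-list copy+join (O(n) copies of the word list, each joined from scratch) with a two-pass prefix/suffix-table strategy: a backward pass builds the suffix string table incrementally, a forward pass carries the growing prefix string and assembles each masked sentence from prefix, '<mask>' and suffix, omitting empty pieces.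
import Mathlib
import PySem

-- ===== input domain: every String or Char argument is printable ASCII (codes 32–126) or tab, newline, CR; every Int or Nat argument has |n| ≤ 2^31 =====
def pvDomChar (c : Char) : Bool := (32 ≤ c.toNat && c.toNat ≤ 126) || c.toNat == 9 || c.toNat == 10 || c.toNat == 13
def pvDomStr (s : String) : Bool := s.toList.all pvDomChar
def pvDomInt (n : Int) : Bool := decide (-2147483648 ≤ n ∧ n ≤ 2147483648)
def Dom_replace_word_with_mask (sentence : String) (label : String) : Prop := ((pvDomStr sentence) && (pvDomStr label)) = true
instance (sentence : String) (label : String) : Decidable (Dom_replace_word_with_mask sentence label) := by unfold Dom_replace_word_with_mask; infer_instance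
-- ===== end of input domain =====

-- B replaces A's per-index copy-the-list-and-join with a backward suffix-table pass plus a forward
-- prefix-carrying pass that assembles each masked string from the non-empty pieces (alternative decomposition).


-- ===== PORT A =====
def replace_word_with_mask (sentence : String) (label : String) : List (String × List String) :=
  let words := PySem.Str.split₀ sentence
  let masked_strings := (PySem.List.pyRange 0 (words.length : Int) 1).foldl
    (fun acc i =>
      -- masked_words = words.copy(); masked_words[i] = "<mask>"
      let masked_words := PySem.List.pySetD words i "<mask>"
      acc ++ [PySem.Str.join " " masked_words]) []
  [(label, masked_strings)]

-- ===== PORT B =====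
-- exact port of Python '+' on str
def pvCat (a b : String) : String := String.ofList (a.toList ++ b.toList)

def replace_word_with_mask_alt (sentence : String) (label : String) : List (String × List String) :=
  let words := PySem.Str.split₀ sentence
  -- backward pass over reversed(words): suffixes.append(suf); suf = w if not suf else w + " " + suf
  let st1 := words.reverse.foldl
    (fun (st : List String × String) w =>
      (st.1 ++ [st.2], if st.2 = "" then w else pvCat (pvCat w " ") st.2)) ([], "")
  let suffixes := st1.1.reverse
  -- forward pass over zip(words, suffixes), carrying the prefix string
  let st2 := (words.zip suffixes).foldl
    (fun (st : List String × String) ws =>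
      let parts := [st.2, "<mask>", ws.2].filter (fun p => p ≠ "")
      (st.1 ++ [PySem.Str.join " " parts],
       if st.2 = "" then ws.1 else pvCat (pvCat st.2 " ") ws.1)) ([], "")
  [(label, st2.1)]

-- ===== PRECONDITION & SPEC =====
def Spec_replace_word_with_mask (sentence : String) (label : String) (out : List (String × List String)) : Prop := out = replace_word_with_mask_alt sentence label
instance (sentence : String) (label : String) (out : List (String × List String)) : Decidable (Spec_replace_word_with_mask sentence label out) := by unfold Spec_replace_word_with_mask; infer_instance

-- ===== CLAIM (what is proved, stated in full; the proofs are below) =====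
def Claim_equal_replace_word_with_mask : Prop := ∀ (sentence : String) (label : String), Dom_replace_word_with_mask sentence label → Spec_replace_word_with_mask sentence label (replace_word_with_mask sentence label)

-- ===== LEMMAS AND PROOFS =====

theorem pvCat_toList (a b : String) : (pvCat a b).toList = a.toList ++ b.toList := by
  simp [pvCat]

theorem pvJoin_nil : PySem.Str.join " " ([] : List String) = "" := by
  apply String.toList_injective
  simp [PySem.Str.toList_join, PySem.Chars.join_nil]

theorem pvJoin_single (x : String) : PySem.Str.join " " [x] = x := by
  apply String.toList_injective
  simp [PySem.Str.toList_join, PySem.Chars.join_singleton]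

theorem pvJoin_cons (x : String) (rest : List String) (h : rest ≠ []) :
    PySem.Str.join " " (x :: rest) = pvCat (pvCat x " ") (PySem.Str.join " " rest) := by
  obtain ⟨y, rest', rfl⟩ := List.exists_cons_of_ne_nil h
  apply String.toList_injective
  simp [PySem.Str.toList_join, pvCat_toList, PySem.Chars.join_cons_cons]

theorem pvJoin_append (xs ys : List String) (hx : xs ≠ []) (hy : ys ≠ []) :
    PySem.Str.join " " (xs ++ ys) =
      pvCat (pvCat (PySem.Str.join " " xs) " ") (PySem.Str.join " " ys) := by
  induction xs with
  | nil => exact absurd rfl hx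
  | cons x xs ih =>
    cases xs with
    | nil => simp [pvJoin_cons _ ys hy, pvJoin_single]
    | cons x2 xs' =>
      have hne : x2 :: xs' ≠ [] := by simp
      have hne2 : (x2 :: xs') ++ ys ≠ [] := by simp
      rw [List.cons_append, pvJoin_cons _ _ hne2, ih hne, pvJoin_cons _ _ hne]
      apply String.toList_injective
      simp [pvCat_toList]

theorem pvJoin_ne (p : List String) (hp : p ≠ []) (hne : ∀ w ∈ p, w ≠ "") :
    PySem.Str.join " " p ≠ "" := by
  obtain ⟨x, rest, rfl⟩ := List.exists_cons_of_ne_nil hp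
  have hx : x ≠ "" := hne x (by simp)
  cases rest with
  | nil => rw [pvJoin_single]; exact hx
  | cons y rest' =>
    rw [pvJoin_cons _ _ (by simp)]
    intro h
    have h2 := congrArg String.toList h
    rw [pvCat_toList, pvCat_toList] at h2
    simp at h2

-- every word produced by str.split() is non-empty
theorem pvSplit₀go_ne (l : List Char) : ∀ (cur : List Char) (acc : List (List Char)),
    (∀ c ∈ acc, c ≠ []) → ∀ w ∈ PySem.Chars.split₀.go l cur acc, w ≠ [] := by
  induction l with
  | nil =>
    intro cur acc hacc w hw
    simp only [PySem.Chars.split₀.go] at hw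
    split at hw
    · exact hacc w (List.mem_reverse.mp hw)
    · rename_i hc
      have hcur : cur ≠ [] := by intro h; subst h; simp at hc
      rcases List.mem_cons.mp (List.mem_reverse.mp hw) with rfl | h
      · simpa using hcur
      · exact hacc w h
  | cons c rest ih =>
    intro cur acc hacc w hw
    simp only [PySem.Chars.split₀.go] at hw
    split at hw
    · split at hw
      · exact ih [] acc hacc w hw
      · rename_i hc
        have hcur : cur ≠ [] := by intro h; subst h; simp at hc
        refine ih [] (cur.reverse :: acc) ?_ w hw
        intro d hd
        rcases List.mem_cons.mp hd with rfl | hm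
        · simpa using hcur
        · exact hacc d hm
    · exact ih (c :: cur) acc hacc w hw

theorem pvSplit₀_ne (s : String) : ∀ w ∈ PySem.Str.split₀ s, w ≠ "" := by
  intro w hw
  simp only [PySem.Str.split₀, List.mem_map] at hw
  obtain ⟨cs, hcs, rfl⟩ := hw
  have : cs ≠ [] := pvSplit₀go_ne s.toList [] [] (by simp) cs hcs
  intro h
  have := congrArg String.toList h
  rw [String.toList_ofList] at this
  exact ‹cs ≠ []› (by simpa using this)

-- A's loop characterised: append-singleton foldl is a map
theorem pvFoldlApp {α β : Type} (f : α → β) (l : List α) (init : List β) :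
    l.foldl (fun acc i => acc ++ [f i]) init = init ++ l.map f := by
  induction l generalizing init with
  | nil => simp
  | cons x xs ih => simp [ih]

theorem pvA_char (W : List String) :
    (PySem.List.pyRange 0 (W.length : Int) 1).foldl
      (fun acc i => acc ++ [PySem.Str.join " " (PySem.List.pySetD W i "<mask>")]) []
    = (List.range W.length).map (fun i => PySem.Str.join " " (W.set i "<mask>")) := by
  rw [PySem.List.pyRange_one]
  rw [List.foldl_map, pvFoldlApp]
  simp

-- suffix-table functions (proof-side characterisations of B's two passes)
def pvSufT : List String → List String
  | [] => []
  | _ :: ws => pvSufT ws ++ [PySem.Str.join " " ws]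

def pvSufD : List String → List String
  | [] => []
  | _ :: ws => PySem.Str.join " " ws :: pvSufD ws

theorem pvB1 (W : List String) (hNE : ∀ w ∈ W, w ≠ "") :
    W.foldr (fun w (st : List String × String) =>
        (st.1 ++ [st.2], if st.2 = "" then w else pvCat (pvCat w " ") st.2)) ([], "")
    = (pvSufT W, PySem.Str.join " " W) := by
  induction W with
  | nil => simp [pvSufT, pvJoin_nil]
  | cons w ws ih =>
    have ihs := ih (fun x hx => hNE x (List.mem_cons_of_mem _ hx))
    simp only [List.foldr_cons, ihs, pvSufT]
    cases ws with
    | nil => simp [pvJoin_nil, pvJoin_single]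
    | cons y ws' =>
      have hne : PySem.Str.join " " (y :: ws') ≠ "" :=
        pvJoin_ne _ (by simp) (fun x hx => hNE x (List.mem_cons_of_mem _ hx))
      simp [hne, pvJoin_cons w (y :: ws') (by simp)]

theorem pvB2 (W : List String) : (pvSufT W).reverse = pvSufD W := by
  induction W with
  | nil => simp [pvSufT, pvSufD]
  | cons w ws ih => simp [pvSufT, pvSufD, ih]

-- the assembled masked string from non-empty pieces equals the full join
theorem pvAssemble (p ws : List String) (hp : ∀ w ∈ p, w ≠ "") (hws : ∀ w ∈ ws, w ≠ "") :
    PySem.Str.join " " ([PySem.Str.join " " p, "<mask>", PySem.Str.join " " ws].filter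
        (fun s => s ≠ ""))
    = PySem.Str.join " " (p ++ "<mask>" :: ws) := by
  by_cases hpn : p = []
  · subst hpn
    by_cases hwn : ws = []
    · subst hwn; simp [pvJoin_nil, pvJoin_single]
    · have h2 := pvJoin_ne ws hwn hws
      simp only [pvJoin_nil, List.filter]
      simp [h2, pvJoin_cons "<mask>" [PySem.Str.join " " ws] (by simp),
        pvJoin_cons "<mask>" ws hwn, pvJoin_single]
  · have h1 := pvJoin_ne p hpn hp
    by_cases hwn : ws = []
    · subst hwn
      simp only [pvJoin_nil, List.filter]
      simp [h1, pvJoin_cons (PySem.Str.join " " p) ["<mask>"] (by simp),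
        pvJoin_single, pvJoin_append p ["<mask>"] hpn (by simp)]
    · have h2 := pvJoin_ne ws hwn hws
      simp only [List.filter]
      simp [h1, h2,
        pvJoin_cons (PySem.Str.join " " p) ["<mask>", PySem.Str.join " " ws] (by simp),
        pvJoin_cons "<mask>" [PySem.Str.join " " ws] (by simp), pvJoin_single,
        pvJoin_append p ("<mask>" :: ws) hpn (by simp),
        pvJoin_cons "<mask>" ws hwn]

-- the carried prefix advances by one word
theorem pvPreStep (p : List String) (w : String) (hp : ∀ x ∈ p, x ≠ "") :
    (if PySem.Str.join " " p = "" then w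
      else pvCat (pvCat (PySem.Str.join " " p) " ") w) = PySem.Str.join " " (p ++ [w]) := by
  by_cases hpn : p = []
  · subst hpn; simp [pvJoin_nil, pvJoin_single]
  · have h1 := pvJoin_ne p hpn hp
    simp [h1, pvJoin_append p [w] hpn (by simp), pvJoin_single]

-- B's forward pass characterised
theorem pvB3 (W : List String) : ∀ (p acc : List String),
    (∀ w ∈ W, w ≠ "") → (∀ w ∈ p, w ≠ "") →
    ((W.zip (pvSufD W)).foldl
      (fun (st : List String × String) ws =>
        (st.1 ++ [PySem.Str.join " " ([st.2, "<mask>", ws.2].filter (fun q => q ≠ ""))],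
         if st.2 = "" then ws.1 else pvCat (pvCat st.2 " ") ws.1))
      (acc, PySem.Str.join " " p)).1
    = acc ++ (List.range W.length).map
        (fun i => PySem.Str.join " " (p ++ W.set i "<mask>")) := by
  induction W with
  | nil => intro p acc _ _; simp [pvSufD]
  | cons w ws ih =>
    intro p acc hW hp
    have hW' : ∀ x ∈ ws, x ≠ "" := fun x hx => hW x (List.mem_cons_of_mem _ hx)
    have hw : w ≠ "" := hW w (by simp)
    have hp' : ∀ x ∈ p ++ [w], x ≠ "" := by
      intro x hx
      rcases List.mem_append.mp hx with h | h
      · exact hp x h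
      · simpa using (List.mem_singleton.mp h) ▸ hw
    simp only [pvSufD, List.zip_cons_cons, List.foldl_cons]
    rw [pvAssemble p ws hp hW', pvPreStep p w hp, ih (p ++ [w]) _ hW' hp']
    simp only [List.length_cons, List.range_succ_eq_map]
    simp [List.map_map, Function.comp, List.append_assoc]

-- ===== VERDICT (by name: the statement is the Claim_ definition above) =====
theorem replace_word_with_mask_spec : Claim_equal_replace_word_with_mask := by
  intro sentence label _
  unfold Spec_replace_word_with_mask replace_word_with_mask replace_word_with_mask_alt
  have hNE := pvSplit₀_ne sentence
  simp only []
  rw [List.foldl_reverse]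
  have h1 : (PySem.Str.split₀ sentence).foldr
      (fun w (st : List String × String) =>
        (st.1 ++ [st.2], if st.2 = "" then w else pvCat (pvCat w " ") st.2)) ([], "")
      = (pvSufT (PySem.Str.split₀ sentence), PySem.Str.join " " (PySem.Str.split₀ sentence)) :=
    pvB1 _ hNE
  rw [h1]
  simp only [pvB2]
  have h3 := pvB3 (PySem.Str.split₀ sentence) [] [] hNE (by simp)
  rw [pvJoin_nil] at h3
  rw [h3, pvA_char]
  simp
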